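-- pv_equiv track=rewrite | github.com/mmagnus/rna-tools | rna_pdb_tools/utils/rna_convert_pseudoknot_formats/rna_ss_pk_to_simrna.py | get_multiple_lines
-- ===== SOURCE A (Python) =====
-- def get_multiple_lines(ss):
--     ss_n = ''
--     ss_pk = ''
--     for i in ss.strip():
--         if i == '[':
--             j = '('
--             i = '.'
--         elif i == ']':
--             j = ')'
--             i = '.'
--         elif i == ' ': # not space
--             j = ' '
--         else:
--             j = '.'
--
--         ss_n += i
--         ss_pk += j
--
--     return ss_n + '\n' + ss_pk
-- ===== SOURCE B (Python) =====
-- def get_multiple_lines(ss):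
--     s = ss.strip()
--     ss_n = s.replace('[', '.').replace(']', '.')
--
--     def dots(q):
--         # every maximal space-free run becomes a run of dots of the same length
--         return ' '.join('.' * len(w) for w in q.split(' '))
--
--     ss_pk = '('.join(')'.join(dots(q) for q in p.split(']')) for p in s.split('['))
--     return ss_n + '\n' + ss_pk
-- ===== Notes on version B (the rewrite author's own statement) =====
-- stated objective: faster
-- what changed: Replaces A's single coupled char-by-char loop (two string accumulators grown in lockstep) with whole-string passes: chained replace calls build the first line, and the second line is rebuilt by splitting on the two bracket characters, rejoining with the corresponding parentheses as separators, and turning each space-free run into a dot run of equal length by length arithmetic.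
import Mathlib
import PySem

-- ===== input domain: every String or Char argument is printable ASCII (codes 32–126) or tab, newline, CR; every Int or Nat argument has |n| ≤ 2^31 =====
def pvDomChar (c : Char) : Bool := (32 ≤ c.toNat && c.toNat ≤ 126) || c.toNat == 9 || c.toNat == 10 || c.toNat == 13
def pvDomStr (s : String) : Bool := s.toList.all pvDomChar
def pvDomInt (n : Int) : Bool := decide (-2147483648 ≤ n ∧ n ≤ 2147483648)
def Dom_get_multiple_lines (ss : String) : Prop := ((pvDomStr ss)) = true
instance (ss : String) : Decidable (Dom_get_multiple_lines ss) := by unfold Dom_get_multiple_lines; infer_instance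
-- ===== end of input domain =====

-- B rebuilds the two lines by whole-string replace and split/join passes (dot runs by length arithmetic) instead of A's single coupled per-char loop; return value identical.

-- ===== PORT A =====
-- one loop over the stripped string, extending both accumulators character by character
def get_multiple_lines (ss : String) : String :=
  let st := (PySem.Str.strip ss).toList.foldl
    (fun (acc : List Char × List Char) i =>
      let p : Char × Char :=   -- (i, j) after the branch chain
        if i = '[' then ('.', '(')
        else if i = ']' then ('.', ')')
        else if i = ' ' then (i, ' ')
        else (i, '.')
      (acc.1 ++ [p.1], acc.2 ++ [p.2]))
    ([], [])
  String.mk (st.1 ++ '\n' :: st.2)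

-- ===== PORT B =====
-- dots(q) = ' '.join('.' * len(w) for w in q.split(' '))
def pvDotsB (q : List Char) : List Char :=
  PySem.Chars.join [' '] ((PySem.Chars.splitOn q [' ']).map (fun w => List.replicate w.length '.'))

def get_multiple_lines_alt (ss : String) : String :=
  let s := PySem.Str.strip ss
  let ss_n := PySem.Str.replace (PySem.Str.replace s "[" ".") "]" "."
  let ss_pk := PySem.Chars.join ['('] ((PySem.Chars.splitOn s.toList ['[']).map (fun p =>
      PySem.Chars.join [')'] ((PySem.Chars.splitOn p [']']).map pvDotsB)))
  String.mk (ss_n.toList ++ '\n' :: ss_pk)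

-- ===== PRECONDITION & SPEC =====
def Spec_get_multiple_lines (ss : String) (out : String) : Prop := out = get_multiple_lines_alt ss
instance (ss : String) (out : String) : Decidable (Spec_get_multiple_lines ss out) := by unfold Spec_get_multiple_lines; infer_instance

-- ===== CLAIM (what is proved, stated in full; the proofs are below) =====
def Claim_equal_get_multiple_lines : Prop := ∀ (ss : String), Dom_get_multiple_lines ss → Spec_get_multiple_lines ss (get_multiple_lines ss)

-- ===== LEMMAS AND PROOFS =====

-- my reference splitter (proof-side only): split on one character
def pvSplit1 (c : Char) : List Char → List (List Char)
  | [] => [[]]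
  | x :: t => if x = c then [] :: pvSplit1 c t else (pvSplit1 c t).modifyHead (x :: ·)

theorem pvSplit1_ne_nil (c : Char) (l : List Char) : pvSplit1 c l ≠ [] := by
  induction l with
  | nil => simp [pvSplit1]
  | cons x t ih =>
    simp only [pvSplit1]
    split_ifs
    · simp
    · cases h : pvSplit1 c t with
      | nil => exact absurd h ih
      | cons a b => simp [h, List.modifyHead]

theorem pvGo_eq (c : Char) : ∀ (fuel : Nat) (l cur : List Char) (acc : List (List Char)),
    l.length ≤ fuel →
    PySem.Chars.splitOn.go [c] fuel l cur acc
      = acc.reverse ++ (pvSplit1 c l).modifyHead (cur.reverse ++ ·) := by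
  intro fuel
  induction fuel with
  | zero =>
    intro l cur acc h
    have : l = [] := List.eq_nil_of_length_eq_zero (Nat.le_zero.mp h)
    subst this
    simp [PySem.Chars.splitOn.go, pvSplit1]
  | succ n ih =>
    intro l cur acc h
    cases l with
    | nil => simp [PySem.Chars.splitOn.go, pvSplit1]
    | cons x t =>
      simp only [PySem.Chars.splitOn.go]
      by_cases hx : x = c
      · have hpre : List.isPrefixOf [c] (x :: t) = true := by
          simp [List.isPrefixOf, hx]
        simp only [hpre, if_true]
        have hdrop : List.drop ([c].length) (x :: t) = t := by simp
        rw [hdrop, ih t [] (cur.reverse :: acc) (Nat.le_of_succ_le_succ (by simpa using h))]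
        subst hx
        simp only [pvSplit1, if_pos rfl, List.reverse_cons, List.append_assoc,
          List.singleton_append]
        cases hs : pvSplit1 x t with
        | nil => exact absurd hs (pvSplit1_ne_nil x t)
        | cons a b => simp [List.modifyHead]
      · have hpre : List.isPrefixOf [c] (x :: t) = false := by
          simp only [List.isPrefixOf, List.isPrefixOf_nil_left, Bool.and_true]
          exact beq_eq_false_iff_ne.mpr (fun hh => hx hh.symm)
        simp only [hpre, if_false, Bool.false_eq_true]
        rw [ih t (x :: cur) acc (by simpa using Nat.le_of_succ_le_succ h)]
        simp only [pvSplit1, if_neg hx, List.reverse_cons]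
        congr 1
        cases hs : pvSplit1 c t with
        | nil => exact absurd hs (pvSplit1_ne_nil c t)
        | cons a b => simp [List.modifyHead]

theorem pvSplitOn_eq (c : Char) (l : List Char) :
    PySem.Chars.splitOn l [c] = pvSplit1 c l := by
  rw [PySem.Chars.splitOn, pvGo_eq c (l.length + 1) l [] [] (by omega)]
  cases h : pvSplit1 c l with
  | nil => exact absurd h (pvSplit1_ne_nil c l)
  | cons a b => simp [List.modifyHead]

-- fused split/map/join on a single-char separator is a per-char map
theorem pvJoinSplit (c r : Char) (h : Char → Char) (l : List Char) :
    PySem.Chars.join [r] ((PySem.Chars.splitOn l [c]).map (List.map h))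
      = l.map (fun x => if x = c then r else h x) := by
  rw [pvSplitOn_eq]
  induction l with
  | nil => simp [pvSplit1, PySem.Chars.join_singleton]
  | cons x t ih =>
    simp only [pvSplit1, List.map_cons]
    by_cases hx : x = c
    · cases hs : pvSplit1 c t with
      | nil => exact absurd hs (pvSplit1_ne_nil c t)
      | cons a b =>
        rw [hs] at ih
        rw [if_pos hx]
        simp only [List.map_cons, PySem.Chars.join_cons_cons, List.map_nil,
          List.nil_append, List.singleton_append] at *
        rw [ih, if_pos hx]
    · cases hs : pvSplit1 c t with
      | nil => exact absurd hs (pvSplit1_ne_nil c t)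
      | cons a b =>
        rw [hs] at ih
        rw [if_neg hx]
        simp only [List.modifyHead, List.map_cons]
        cases b with
        | nil =>
          simp only [List.map_nil, List.map_cons, PySem.Chars.join_singleton] at *
          simp [ih, if_neg hx]
        | cons b0 bs =>
          simp only [List.map_cons, PySem.Chars.join_cons_cons, List.cons_append] at *
          simp [ih, if_neg hx]

theorem pvReplace_go (a b : Char) : ∀ (fuel : Nat) (l acc : List Char),
    l.length ≤ fuel →
    PySem.Chars.replace.go [a] [b] fuel l acc
      = acc.reverse ++ l.map (fun x => if x = a then b else x) := by
  intro fuel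
  induction fuel with
  | zero =>
    intro l acc h
    have : l = [] := List.eq_nil_of_length_eq_zero (Nat.le_zero.mp h)
    subst this
    simp [PySem.Chars.replace.go]
  | succ n ih =>
    intro l acc h
    cases l with
    | nil => simp [PySem.Chars.replace.go]
    | cons x t =>
      simp only [PySem.Chars.replace.go]
      by_cases hx : x = a
      · subst hx
        have hpre : List.isPrefixOf [x] (x :: t) = true := by simp [List.isPrefixOf]
        simp only [hpre, if_true]
        have hdrop : List.drop ([x].length) (x :: t) = t := by simp
        rw [hdrop, ih t ([b].reverse ++ acc) (by simpa using Nat.le_of_succ_le_succ h)]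
        simp
      · have hpre : List.isPrefixOf [a] (x :: t) = false := by
          simp [List.isPrefixOf]
          exact fun hh => absurd hh.symm hx
        simp only [hpre, if_false]
        rw [ih t (x :: acc) (by simpa using Nat.le_of_succ_le_succ h)]
        simp [hx]

theorem pvReplace_eq (a b : Char) (l : List Char) :
    PySem.Chars.replace l [a] [b] = l.map (fun x => if x = a then b else x) := by
  rw [PySem.Chars.replace]
  simp only [List.isEmpty_cons, if_false, Bool.false_eq_true]
  exact pvReplace_go a b l.length l [] le_rfl

-- A's loop computes exactly the two per-char maps
theorem pvFoldA (l : List Char) (a b : List Char) :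
    l.foldl
      (fun (acc : List Char × List Char) i =>
        let p : Char × Char :=
          if i = '[' then ('.', '(')
          else if i = ']' then ('.', ')')
          else if i = ' ' then (i, ' ')
          else (i, '.')
        (acc.1 ++ [p.1], acc.2 ++ [p.2]))
      (a, b)
    = (a ++ l.map (fun c => if c = '[' ∨ c = ']' then '.' else c),
       b ++ l.map (fun c => if c = '[' then '(' else if c = ']' then ')' else if c = ' ' then ' ' else '.')) := by
  induction l generalizing a b with
  | nil => simp
  | cons c t ih =>
    simp only [List.foldl_cons, List.map_cons, ih, List.append_assoc, List.cons_append,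
      List.nil_append]
    by_cases h1 : c = '[' <;> by_cases h2 : c = ']' <;> by_cases h3 : c = ' ' <;>
      simp_all

theorem pvDotsB_eq (q : List Char) :
    pvDotsB q = q.map (fun x => if x = ' ' then ' ' else '.') := by
  unfold pvDotsB
  have : ∀ w : List Char, List.replicate w.length '.' = w.map (fun _ => '.') := by
    intro w; simp [List.map_const']
  simp only [this]
  exact pvJoinSplit ' ' ' ' (fun _ => '.') q

-- ===== VERDICT (by name: the statement is the Claim_ definition above) =====
theorem get_multiple_lines_spec : Claim_equal_get_multiple_lines := by
  intro ss _
  unfold Spec_get_multiple_lines get_multiple_lines get_multiple_lines_alt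
  rw [pvFoldA]
  simp only [List.nil_append]
  have hinner : ∀ p : List Char,
      PySem.Chars.join [')'] ((PySem.Chars.splitOn p [']']).map pvDotsB)
        = p.map (fun x => if x = ']' then ')' else if x = ' ' then ' ' else '.') := by
    intro p
    have hm : (PySem.Chars.splitOn p [']']).map pvDotsB
        = (PySem.Chars.splitOn p [']']).map (List.map (fun x => if x = ' ' then ' ' else '.')) := by
      congr 1
      funext q
      exact pvDotsB_eq q
    rw [hm, pvJoinSplit]
  have houter : (PySem.Chars.splitOn (PySem.Str.strip ss).toList ['[']).map (fun p =>
        PySem.Chars.join [')'] ((PySem.Chars.splitOn p [']']).map pvDotsB))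
      = (PySem.Chars.splitOn (PySem.Str.strip ss).toList ['[']).map
          (List.map (fun x => if x = ']' then ')' else if x = ' ' then ' ' else '.')) := by
    congr 1
    funext p
    exact hinner p
  have hn : (PySem.Str.replace (PySem.Str.replace (PySem.Str.strip ss) "[" ".") "]" ".").toList
      = (PySem.Str.strip ss).toList.map (fun c => if c = '[' ∨ c = ']' then '.' else c) := by
    simp only [PySem.Str.toList_replace]
    have h1 : "[".toList = ['['] := by decide
    have h2 : "]".toList = [']'] := by decide
    have h3 : ".".toList = ['.'] := by decide
    rw [h1, h2, h3, pvReplace_eq, pvReplace_eq, List.map_map]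
    apply List.map_congr_left
    intro x _
    by_cases hx1 : x = '[' <;> by_cases hx2 : x = ']' <;> simp_all
  rw [houter, pvJoinSplit, hn]
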